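-- pv_equiv track=rewrite | github.com/lawseekdog/e2e-tests | scripts/_support/flow_score_support.py | _bundle_phase_timeline
-- ===== SOURCE A (Python) =====
-- from typing import Any
--
-- def _safe_str(value: Any) -> str:
--     return str(value or "").strip()
--
-- def _bundle_phase_timeline(traces: list[dict[str, Any]]) -> dict[str, Any]:
--     phases: list[dict[str, Any]] = []
--     seen: set[str] = set()
--     ordered = sorted(
--         [row for row in traces if isinstance(row, dict)],
--         key=lambda row: int(row.get("sequence") or 0),
--     )
--     for row in ordered:
--         node_id = _safe_str(row.get("node_id"))
--         phase_id = _safe_str(node_id.split(":")[-1] if ":" in node_id else node_id)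
--         if not phase_id or phase_id in seen:
--             continue
--         seen.add(phase_id)
--         phases.append({"id": phase_id, "status": _safe_str(row.get("status")) or "completed"})
--     return {"phases": phases} if phases else {}
-- ===== SOURCE B (Python) =====
-- def _bundle_phase_timeline(traces):
--     def _safe_str(value):
--         return str(value or "").strip()
--     # One pass: per phase_id keep the row with the smallest (sequence, original index);
--     # then a single sort of the (few) winners reproduces the stable-sort + first-seen order.
--     winners = {}
--     for idx, row in enumerate(traces):
--         if not isinstance(row, dict):
--             continue
--         node_id = _safe_str(row.get("node_id"))
--         phase_id = _safe_str(node_id.split(":")[-1] if ":" in node_id else node_id)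
--         if not phase_id:
--             continue
--         key = (int(row.get("sequence") or 0), idx)
--         status = _safe_str(row.get("status")) or "completed"
--         if phase_id not in winners:
--             winners[phase_id] = (key, status)
--         elif key < winners[phase_id][0]:
--             winners[phase_id] = (key, status)
--     if not winners:
--         return {}
--     phases = [{"id": pid, "status": st}
--               for pid, (_key, st) in sorted(winners.items(), key=lambda kv: kv[1][0])]
--     return {"phases": phases}
-- ===== Notes on version B (the rewrite author's own statement) =====
-- stated objective: alternative
-- what changed: Replaces A's sort-all-rows-then-dedup-scan with a single grouping pass keeping, per phase_id, the row with the smallest (sequence, original index), then one sort of only the per-phase winners.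
import Mathlib
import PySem

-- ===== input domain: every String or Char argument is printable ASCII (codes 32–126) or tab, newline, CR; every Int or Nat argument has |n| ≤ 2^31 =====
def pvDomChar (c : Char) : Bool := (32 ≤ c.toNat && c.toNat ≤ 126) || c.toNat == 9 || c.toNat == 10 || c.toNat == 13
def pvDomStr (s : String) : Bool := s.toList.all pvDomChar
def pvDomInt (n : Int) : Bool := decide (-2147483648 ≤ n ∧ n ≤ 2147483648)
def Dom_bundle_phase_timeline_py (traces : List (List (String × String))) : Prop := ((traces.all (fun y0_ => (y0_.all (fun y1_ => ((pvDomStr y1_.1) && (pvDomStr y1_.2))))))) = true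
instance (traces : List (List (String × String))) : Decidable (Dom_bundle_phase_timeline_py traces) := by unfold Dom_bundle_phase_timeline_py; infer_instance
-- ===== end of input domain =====

-- B replaces A's sort-all-rows-then-dedup-scan by one grouping pass keeping, per phase id,
-- the row with the smallest (sequence, original index), then a single sort of the winners
-- (alternative decomposition; return value proved equal on Pre_).

-- Shared row accessors (the same Python expressions appear verbatim in both A and B):
-- row.get(k) — dict lookup, first match per the association-list convention
def pvGetKey (row : List (String × String)) (k : String) : Option String :=
  (PySem.Dict.mk row).get? k

-- _safe_str(value) = str(value or "").strip(); on an Optional[str] argument this is exact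
def pvSafeStr (v : Option String) : String := PySem.Str.strip (v.getD "")

-- int(row.get("sequence") or 0); the .getD 0 is unreachable under Pre_ (int() would raise)
def pvSeqKey (row : List (String × String)) : Int :=
  match pvGetKey row "sequence" with
  | none => 0
  | some s => if s = "" then 0 else (PySem.Int.ofStr? s).getD 0

-- _safe_str(node_id.split(":")[-1] if ":" in node_id else node_id)
def pvPhaseId (row : List (String × String)) : String :=
  let node_id := pvSafeStr (pvGetKey row "node_id")
  pvSafeStr (some (if PySem.Str.isIn ":" node_id then
      (PySem.List.pyGet? ((PySem.Str.split? node_id ":").getD []) (-1)).getD ""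
    else node_id))

-- _safe_str(row.get("status")) or "completed"
def pvStatus (row : List (String × String)) : String :=
  let s := pvSafeStr (pvGetKey row "status")
  if s = "" then "completed" else s

-- ===== PORT A =====
-- loop body of A's 'for row in ordered' (state: (phases, seen))
def pvScanStep (acc : List (List (String × String)) × PySem.Set String)
    (row : List (String × String)) : List (List (String × String)) × PySem.Set String :=
  let phase_id := pvPhaseId row
  if phase_id == "" || PySem.Set.contains acc.2 phase_id then acc
  else (acc.1 ++ [[("id", phase_id), ("status", pvStatus row)]], PySem.Set.add acc.2 phase_id)

def bundle_phase_timeline_py (traces : List (List (String × String))) :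
    List (String × List (List (String × String))) :=
  -- [row for row in traces if isinstance(row, dict)] keeps every row (all rows are dicts here)
  let ordered := PySem.List.sorted traces pvSeqKey false
  let r := ordered.foldl pvScanStep ([], PySem.Set.empty)
  if r.1 = [] then [] else [("phases", r.1)]

-- ===== PORT B =====
-- loop body of B's grouping pass: winners[phase_id] = min by (sequence, index)
-- Python's tuple comparison key < winners[phase_id][0] is lexicographic: ported as toLex _ < toLex _
def pvWinStep (w : PySem.Dict String ((Int × Int) × String))
    (e : Int × List (String × String)) : PySem.Dict String ((Int × Int) × String) :=
  let phase_id := pvPhaseId e.2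
  if phase_id == "" then w
  else
    let key : Int × Int := (pvSeqKey e.2, e.1)
    let status := pvStatus e.2
    match w.get? phase_id with
    | none => w.insert phase_id (key, status)
    | some old => if toLex key < toLex old.1 then w.insert phase_id (key, status) else w

def bundle_phase_timeline_py_alt (traces : List (List (String × String))) :
    List (String × List (List (String × String))) :=
  let winners := (PySem.List.enumerate traces 0).foldl pvWinStep PySem.Dict.empty
  if winners.items = [] then []
  else [("phases",
    (PySem.List.sorted winners.items (fun kv => toLex kv.2.1) false).map
      (fun kv => [("id", kv.1), ("status", kv.2.2)]))]

-- ===== PRECONDITION & SPEC =====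
-- Pre_ excludes exactly the inputs where A raises ValueError: a row whose "sequence" value is a
-- non-empty string that int() cannot parse.
def pvSeqOk (row : List (String × String)) : Bool :=
  match pvGetKey row "sequence" with
  | none => true
  | some s => s == "" || (PySem.Int.ofStr? s).isSome

def Pre_bundle_phase_timeline_py (traces : List (List (String × String))) : Prop :=
  traces.all pvSeqOk = true
instance (traces : List (List (String × String))) : Decidable (Pre_bundle_phase_timeline_py traces) := by unfold Pre_bundle_phase_timeline_py; infer_instance

def pvWitness_bundle_phase_timeline_py : (List (List (String × String))) :=
  [[("node_id", "a:p1"), ("sequence", "2"), ("status", "done")],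
   [("node_id", "p1"), ("sequence", "1")],
   [("node_id", "p2"), ("sequence", "1")]]

def Spec_bundle_phase_timeline_py (traces : List (List (String × String))) (out : List (String × List (List (String × String)))) : Prop := out = bundle_phase_timeline_py_alt traces
instance (traces : List (List (String × String))) (out : List (String × List (List (String × String)))) : Decidable (Spec_bundle_phase_timeline_py traces out) := by unfold Spec_bundle_phase_timeline_py; infer_instance

-- ===== CLAIM (what is proved, stated in full; the proofs are below) =====
def Claim_equal_bundle_phase_timeline_py : Prop := ∀ (traces : List (List (String × String))), Dom_bundle_phase_timeline_py traces → Pre_bundle_phase_timeline_py traces → Spec_bundle_phase_timeline_py traces (bundle_phase_timeline_py traces)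

-- ===== LEMMAS AND PROOFS =====

-- Abbreviations used only by the proofs
def pvKM (M : Int) (e : Int × List (String × String)) : Int := pvSeqKey e.2 * M + e.1
def pvKeyL (e : Int × List (String × String)) : Lex (Int × Int) := toLex (pvSeqKey e.2, e.1)
def pvVal (e : Int × List (String × String)) : (Int × Int) × String :=
  ((pvSeqKey e.2, e.1), pvStatus e.2)
def pvD (traces : List (List (String × String))) : List (Int × List (String × String)) :=
  PySem.List.sorted (PySem.List.enumerate traces 0) (pvKM traces.length) false
def pvFirstD : List (Int × List (String × String)) → PySem.Set String →
    List (Int × List (String × String))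
  | [], _ => []
  | e :: t, seen =>
    if pvPhaseId e.2 == "" || PySem.Set.contains seen (pvPhaseId e.2) then pvFirstD t seen
    else e :: pvFirstD t (PySem.Set.add seen (pvPhaseId e.2))
def pvCombine (o : Option ((Int × Int) × String)) (n : (Int × Int) × String) :
    (Int × Int) × String :=
  match o with
  | none => n
  | some v => if toLex n.1 < toLex v.1 then n else v
def pvW' (traces : List (List (String × String))) : List (String × ((Int × Int) × String)) :=
  (pvFirstD (pvD traces) PySem.Set.empty).map (fun e => (pvPhaseId e.2, pvVal e))

lemma pvInsertBy_cons {α : Type} (b : α → α → Bool) (x y : α) (ys : List α) :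
    PySem.List.insertBy b x (y :: ys) =
      if b x y then x :: y :: ys else y :: PySem.List.insertBy b x ys := rfl

lemma pvKM_mono (M s1 s2 i1 i2 : Int) (hs : s1 < s2) (h1 : 0 ≤ i1) (h1' : i1 < M)
    (h2 : 0 ≤ i2) : s1 * M + i1 < s2 * M + i2 := by
  have hM1 : (s1 + 1) * M ≤ s2 * M :=
    mul_le_mul_of_nonneg_right (by omega) (by omega)
  nlinarith

lemma pvKM_lt_iff (M s1 s2 i1 i2 : Int) (h1 : 0 ≤ i1) (h1' : i1 < M)
    (h2 : 0 ≤ i2) (h2' : i2 < M) :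
    s1 * M + i1 < s2 * M + i2 ↔ (s1 < s2 ∨ (s1 = s2 ∧ i1 < i2)) := by
  constructor
  · intro h
    rcases lt_trichotomy s1 s2 with h' | h' | h'
    · exact Or.inl h'
    · subst h'; right; exact ⟨rfl, by nlinarith⟩
    · exact absurd (pvKM_mono M s2 s1 i2 i1 h' h2 h2' h1) (by omega)
  · rintro (h' | ⟨rfl, h'⟩)
    · exact pvKM_mono M s1 s2 i1 i2 h' h1 h1' h2
    · omega

lemma pvInsert_map (M : Int) (e : Int × List (String × String))
    (acc : List (Int × List (String × String)))
    (h : ∀ y ∈ acc, decide (pvKM M e < pvKM M y) = decide (pvSeqKey e.2 < pvSeqKey y.2)) :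
    (PySem.List.insertBy (fun a b => decide (pvKM M a < pvKM M b)) e acc).map (·.2)
      = PySem.List.insertBy (fun a b => decide (pvSeqKey a < pvSeqKey b)) e.2
          (acc.map (·.2)) := by
  induction acc with
  | nil => rfl
  | cons y t ih =>
    rw [pvInsertBy_cons, List.map_cons, pvInsertBy_cons]
    rw [h y (by simp)]
    by_cases hb : pvSeqKey e.2 < pvSeqKey y.2
    · simp [hb]
    · simp [hb, ih (fun z hz => h z (by simp [hz]))]

lemma pvFoldSort (M : Int) (xs : List (List (String × String))) :
    ∀ (s : Int) (acc : List (Int × List (String × String))),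
    0 ≤ s → (∀ y ∈ acc, 0 ≤ y.1 ∧ y.1 < s) → s + xs.length ≤ M →
    ((PySem.List.enumerate xs s).foldl
        (fun a e => PySem.List.insertBy (fun a b => decide (pvKM M a < pvKM M b)) e a)
        acc).map (·.2)
      = xs.foldl
          (fun a x => PySem.List.insertBy (fun a b => decide (pvSeqKey a < pvSeqKey b)) x a)
          (acc.map (·.2)) := by
  induction xs with
  | nil => intro s acc _ _ _; simp [PySem.List.enumerate_nil]
  | cons x t ih =>
    intro s acc hs hacc hM
    rw [PySem.List.enumerate_cons, List.foldl_cons, List.foldl_cons]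
    have hsM : s < M := by simp at hM; omega
    have hmap : (PySem.List.insertBy (fun a b => decide (pvKM M a < pvKM M b)) (s, x) acc).map (·.2)
        = PySem.List.insertBy (fun a b => decide (pvSeqKey a < pvSeqKey b)) x (acc.map (·.2)) := by
      have := pvInsert_map M (s, x) acc (fun y hy => by
        have hb := hacc y hy
        have : (pvKM M (s, x) < pvKM M y) ↔ (pvSeqKey x < pvSeqKey y.2) := by
          unfold pvKM
          rw [pvKM_lt_iff M _ _ _ _ (by omega) (by omega) (by omega) (by omega)]
          constructor
          · rintro (h' | ⟨_, h'⟩)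
            · exact h'
            · omega
          · exact Or.inl
        simp [this])
      simpa using this
    rw [← hmap]
    exact ih (s + 1) _ (by omega)
      (fun y hy => by
        rcases (PySem.List.mem_insertBy _ _ _ _).mp hy with h | h
        · subst h; constructor <;> omega
        · have := hacc y h; constructor <;> omega)
      (by simp at hM ⊢; omega)

lemma pvSorted_eq (traces : List (List (String × String))) :
    PySem.List.sorted traces pvSeqKey false = (pvD traces).map (·.2) := by
  unfold pvD
  rw [PySem.List.sorted_eq_foldl_insertBy, PySem.List.sorted_eq_foldl_insertBy]
  rw [pvFoldSort traces.length traces 0 [] le_rfl (by simp) (by simp)]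
  rfl

lemma pvE_bounds {traces : List (List (String × String))} {e : Int × List (String × String)}
    (h : e ∈ PySem.List.enumerate traces 0) : 0 ≤ e.1 ∧ e.1 < (traces.length : Int) := by
  rcases (PySem.List.mem_enumerate_iff _ _ _).mp h with ⟨k, hk, rfl⟩
  constructor <;> [omega; (simp; omega)]

lemma pvE_inj {traces : List (List (String × String))} {e e' : Int × List (String × String)}
    (h : e ∈ PySem.List.enumerate traces 0) (h' : e' ∈ PySem.List.enumerate traces 0)
    (hfst : e.1 = e'.1) : e = e' := by
  rcases (PySem.List.mem_enumerate_iff _ _ _).mp h with ⟨k, hk, rfl⟩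
  rcases (PySem.List.mem_enumerate_iff _ _ _).mp h' with ⟨k', hk', rfl⟩
  simp at hfst
  have hk : k = k' := by omega
  subst hk; rfl

lemma pvD_perm (traces : List (List (String × String))) :
    (pvD traces).Perm (PySem.List.enumerate traces 0) :=
  PySem.List.sorted_perm _ _ _

lemma pvD_pairwise (traces : List (List (String × String))) :
    (pvD traces).Pairwise (fun a b => pvKeyL a < pvKeyL b) := by
  have hle : (pvD traces).Pairwise
      (fun a b => pvKM traces.length a ≤ pvKM traces.length b) :=
    PySem.List.sorted_pairwise _ _
  have hne : (pvD traces).Pairwise (fun a b => a.1 ≠ b.1) := by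
    have h2 : (PySem.List.enumerate traces 0).Pairwise (fun a b => a.1 ≠ b.1) :=
      (PySem.List.pairwise_lt_enumerate traces 0).imp (fun h => ne_of_lt h)
    exact (List.Perm.pairwise_iff (fun h => Ne.symm h) (pvD_perm traces)).mpr h2
  have hmem : ∀ e ∈ pvD traces, 0 ≤ e.1 ∧ e.1 < (traces.length : Int) :=
    fun e he => pvE_bounds ((pvD_perm traces).mem_iff.mp he)
  refine List.Pairwise.imp_of_mem ?_ (hle.and hne)
  intro a b ha hb hab
  obtain ⟨hab1, hab2⟩ := hab
  have hA := hmem a ha; have hB := hmem b hb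
  show pvKeyL a < pvKeyL b
  rw [pvKeyL, pvKeyL, Prod.Lex.toLex_lt_toLex]
  rcases lt_or_eq_of_le hab1 with hlt | heq
  · unfold pvKM at hlt
    exact (pvKM_lt_iff traces.length _ _ _ _ hA.1 hA.2 hB.1 hB.2).mp hlt
  · exfalso
    unfold pvKM at heq
    have h1 : ¬(pvSeqKey a.2 * traces.length + a.1 < pvSeqKey b.2 * traces.length + b.1) := by omega
    have h2 : ¬(pvSeqKey b.2 * traces.length + b.1 < pvSeqKey a.2 * traces.length + a.1) := by omega
    rw [pvKM_lt_iff traces.length _ _ _ _ hA.1 hA.2 hB.1 hB.2] at h1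
    rw [pvKM_lt_iff traces.length _ _ _ _ hB.1 hB.2 hA.1 hA.2] at h2
    push Not at h1 h2
    omega

lemma pvFirstD_sub {l : List (Int × List (String × String))} {seen : PySem.Set String}
    {e : Int × List (String × String)} (h : e ∈ pvFirstD l seen) :
    e ∈ l ∧ pvPhaseId e.2 ≠ "" ∧ PySem.Set.contains seen (pvPhaseId e.2) = false := by
  induction l generalizing seen with
  | nil => simp [pvFirstD] at h
  | cons r t ih =>
    unfold pvFirstD at h
    by_cases hc : (pvPhaseId r.2 == "" || PySem.Set.contains seen (pvPhaseId r.2)) = true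
    · rw [if_pos hc] at h
      obtain ⟨h1, h2, h3⟩ := ih h
      exact ⟨List.mem_cons_of_mem _ h1, h2, h3⟩
    · rw [if_neg hc] at h
      simp only [Bool.or_eq_true, beq_iff_eq, not_or] at hc
      rcases List.mem_cons.mp h with rfl | h'
      · exact ⟨List.mem_cons_self, hc.1, by simpa using hc.2⟩
      · obtain ⟨h1, h2, h3⟩ := ih h'
        refine ⟨List.mem_cons_of_mem _ h1, h2, ?_⟩
        have : pvPhaseId e.2 ∉ PySem.Set.add seen (pvPhaseId r.2) := by
          simpa [PySem.Set.contains_iff] using h3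
        rw [PySem.Set.mem_add] at this
        simpa [PySem.Set.contains_iff] using fun hm => this (Or.inl hm)

lemma pvFirstD_sublist (l : List (Int × List (String × String))) (seen : PySem.Set String) :
    (pvFirstD l seen).Sublist l := by
  induction l generalizing seen with
  | nil => simp [pvFirstD]
  | cons r t ih =>
    unfold pvFirstD
    split
    · exact (ih seen).cons r
    · exact (ih _).cons₂ r

lemma pvFirstD_min {l : List (Int × List (String × String))} {seen : PySem.Set String}
    (hp : l.Pairwise (fun a b => pvKeyL a < pvKeyL b))
    {e : Int × List (String × String)} (he : e ∈ pvFirstD l seen) :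
    ∀ e' ∈ l, pvPhaseId e'.2 = pvPhaseId e.2 → pvKeyL e ≤ pvKeyL e' := by
  induction l generalizing seen with
  | nil => simp [pvFirstD] at he
  | cons r t ih =>
    have hr : ∀ b ∈ t, pvKeyL r < pvKeyL b := (List.pairwise_cons.mp hp).1
    have hp' := (List.pairwise_cons.mp hp).2
    unfold pvFirstD at he
    by_cases hc : (pvPhaseId r.2 == "" || PySem.Set.contains seen (pvPhaseId r.2)) = true
    · rw [if_pos hc] at he
      obtain ⟨_, hne, hcf⟩ := pvFirstD_sub he
      intro e' he' hpid
      rcases List.mem_cons.mp he' with rfl | h'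
      · exfalso
        simp only [Bool.or_eq_true, beq_iff_eq] at hc
        rcases hc with hc | hc
        · exact hne (hpid ▸ hc)
        · rw [hpid] at hc; rw [hc] at hcf; simp at hcf
      · exact ih hp' he e' h' hpid
    · rw [if_neg hc] at he
      rcases List.mem_cons.mp he with rfl | he'
      · intro e' he' hpid
        rcases List.mem_cons.mp he' with rfl | h'
        · exact le_refl _
        · exact (hr e' h').le
      · obtain ⟨_, hne, hcf⟩ := pvFirstD_sub he'
        have hner : pvPhaseId e.2 ≠ pvPhaseId r.2 := by
          intro hEq
          have : pvPhaseId e.2 ∈ PySem.Set.add seen (pvPhaseId r.2) := by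
            rw [PySem.Set.mem_add]; exact Or.inr hEq
          rw [← PySem.Set.contains_iff] at this
          rw [this] at hcf; exact Bool.noConfusion hcf
        intro e' hmem hpid
        rcases List.mem_cons.mp hmem with rfl | h'
        · exact absurd hpid.symm hner
        · exact ih hp' he' e' h' hpid

lemma pvFirstD_exists {l : List (Int × List (String × String))} {seen : PySem.Set String}
    {p : String} (hp : p ≠ "") (hs : PySem.Set.contains seen p = false)
    (h : ∃ e ∈ l, pvPhaseId e.2 = p) : ∃ e ∈ pvFirstD l seen, pvPhaseId e.2 = p := by
  induction l generalizing seen with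
  | nil => simp at h
  | cons r t ih =>
    by_cases hpr : pvPhaseId r.2 = p
    · have hc : (pvPhaseId r.2 == "" || PySem.Set.contains seen (pvPhaseId r.2)) = false := by
        rw [hpr]
        simp only [Bool.or_eq_false_iff, beq_eq_false_iff_ne, ne_eq]
        exact ⟨hp, hs⟩
      refine ⟨r, ?_, hpr⟩
      unfold pvFirstD
      rw [if_neg (by rw [hc]; simp)]
      exact List.mem_cons_self
    · obtain ⟨e, he, hpe⟩ := h
      rcases List.mem_cons.mp he with rfl | he'
      · exact absurd hpe hpr
      · unfold pvFirstD
        split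
        · exact ih hs ⟨e, he', hpe⟩
        · have hs' : PySem.Set.contains (PySem.Set.add seen (pvPhaseId r.2)) p = false := by
            have : p ∉ PySem.Set.add seen (pvPhaseId r.2) := by
              rw [PySem.Set.mem_add]
              rintro (hm | hm)
              · rw [← PySem.Set.contains_iff] at hm; rw [hm] at hs; exact Bool.noConfusion hs
              · exact hpr hm.symm
            simpa [PySem.Set.contains_iff] using this
          obtain ⟨e', he'', hp'⟩ := ih hs' ⟨e, he', hpe⟩
          exact ⟨e', List.mem_cons_of_mem _ he'', hp'⟩

lemma pvFirstD_pid_nodup (l : List (Int × List (String × String))) (seen : PySem.Set String) :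
    (pvFirstD l seen).Pairwise (fun a b => pvPhaseId a.2 ≠ pvPhaseId b.2) := by
  induction l generalizing seen with
  | nil => simp [pvFirstD]
  | cons r t ih =>
    unfold pvFirstD
    split
    · exact ih seen
    · refine List.pairwise_cons.mpr ⟨?_, ih _⟩
      intro b hb
      obtain ⟨_, _, hcf⟩ := pvFirstD_sub hb
      intro hEq
      have : pvPhaseId b.2 ∈ PySem.Set.add seen (pvPhaseId r.2) := by
        rw [PySem.Set.mem_add]; exact Or.inr hEq.symm
      rw [← PySem.Set.contains_iff] at this
      rw [this] at hcf; exact Bool.noConfusion hcf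

lemma pvScanD (l : List (Int × List (String × String))) :
    ∀ (seen : PySem.Set String) (acc : List (List (String × String))),
    ((l.map (·.2)).foldl pvScanStep (acc, seen)).1
      = acc ++ (pvFirstD l seen).map (fun e => [("id", pvPhaseId e.2), ("status", pvStatus e.2)]) := by
  induction l with
  | nil => intro seen acc; simp [pvFirstD]
  | cons e t ih =>
    intro seen acc
    rw [List.map_cons, List.foldl_cons]
    unfold pvFirstD
    by_cases hc : (pvPhaseId e.2 == "" || PySem.Set.contains seen (pvPhaseId e.2)) = true
    · have hstep : pvScanStep (acc, seen) e.2 = (acc, seen) := by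
        unfold pvScanStep; rw [if_pos hc]
      rw [hstep, if_pos hc, ih seen acc]
    · have hstep : pvScanStep (acc, seen) e.2
          = (acc ++ [[("id", pvPhaseId e.2), ("status", pvStatus e.2)]],
             PySem.Set.add seen (pvPhaseId e.2)) := by
        unfold pvScanStep; rw [if_neg hc]
      rw [hstep, if_neg hc, ih _ _, List.map_cons, List.append_assoc]
      rfl

lemma pvWinStep_eq_of_empty {w : PySem.Dict String ((Int × Int) × String)}
    {e : Int × List (String × String)} (h : pvPhaseId e.2 = "") : pvWinStep w e = w := by
  unfold pvWinStep; rw [if_pos (by simp [h])]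

lemma pvWinStep_eq {w : PySem.Dict String ((Int × Int) × String)}
    {e : Int × List (String × String)} (h : pvPhaseId e.2 ≠ "") :
    pvWinStep w e = (match w.get? (pvPhaseId e.2) with
      | none => w.insert (pvPhaseId e.2) (pvVal e)
      | some old => if toLex (pvVal e).1 < toLex old.1 then w.insert (pvPhaseId e.2) (pvVal e)
                    else w) := by
  unfold pvWinStep pvVal
  rw [if_neg (by simp [h])]

lemma pvWinStep_cases (w : PySem.Dict String ((Int × Int) × String))
    (e : Int × List (String × String)) :
    pvWinStep w e = w ∨
      (pvPhaseId e.2 ≠ "" ∧ pvWinStep w e = w.insert (pvPhaseId e.2) (pvVal e)) := by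
  by_cases h : pvPhaseId e.2 = ""
  · exact Or.inl (pvWinStep_eq_of_empty h)
  · rw [pvWinStep_eq h]
    cases hd : w.get? (pvPhaseId e.2) with
    | none => exact Or.inr ⟨h, rfl⟩
    | some old =>
      dsimp only
      by_cases hlt : toLex (pvVal e).1 < toLex old.1
      · rw [if_pos hlt]; exact Or.inr ⟨h, rfl⟩
      · rw [if_neg hlt]; exact Or.inl rfl

lemma pvWinStep_get_ne {w : PySem.Dict String ((Int × Int) × String)}
    {e : Int × List (String × String)} {p : String} (hq : pvPhaseId e.2 ≠ p) :
    (pvWinStep w e).get? p = w.get? p := by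
  rcases pvWinStep_cases w e with h | ⟨h0, h⟩
  · rw [h]
  · rw [h, PySem.Dict.get?_insert_of_ne _ _ (Ne.symm hq)]

lemma pvWinStep_get_self {w : PySem.Dict String ((Int × Int) × String)}
    {e : Int × List (String × String)} (h : pvPhaseId e.2 ≠ "") :
    (pvWinStep w e).get? (pvPhaseId e.2)
      = some (pvCombine (w.get? (pvPhaseId e.2)) (pvVal e)) := by
  rw [pvWinStep_eq h]
  cases hd : w.get? (pvPhaseId e.2) with
  | none => simp [pvCombine, PySem.Dict.get?_insert_self]
  | some old =>
    by_cases hlt : toLex (pvVal e).1 < toLex old.1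
    · simp [hlt, pvCombine, PySem.Dict.get?_insert_self]
    · simp [hlt, pvCombine, hd]

lemma pvWinGet (l : List (Int × List (String × String))) :
    ∀ (d : PySem.Dict String ((Int × Int) × String)) (p : String), p ≠ "" →
    (l.foldl pvWinStep d).get? p
      = (l.filter (fun e => pvPhaseId e.2 == p)).foldl
          (fun o e => some (pvCombine o (pvVal e))) (d.get? p) := by
  induction l with
  | nil => intro d p hp; rfl
  | cons e t ih =>
    intro d p hp
    rw [List.foldl_cons, List.filter_cons]
    by_cases hqp : pvPhaseId e.2 = p
    · have hq : pvPhaseId e.2 ≠ "" := by rw [hqp]; exact hp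
      rw [if_pos (by simp [hqp]), List.foldl_cons, ih (pvWinStep d e) p hp]
      have : (pvWinStep d e).get? p = some (pvCombine (d.get? p) (pvVal e)) := by
        rw [← hqp]; exact pvWinStep_get_self hq
      rw [this]
    · rw [if_neg (by simp [hqp]), ih (pvWinStep d e) p hp, pvWinStep_get_ne hqp]

lemma pvWinKeysNodup (l : List (Int × List (String × String))) :
    ∀ d : PySem.Dict String ((Int × Int) × String), d.keys.Nodup →
    (l.foldl pvWinStep d).keys.Nodup := by
  induction l with
  | nil => intro d h; exact h
  | cons e t ih =>
    intro d h
    rw [List.foldl_cons]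
    refine ih _ ?_
    rcases pvWinStep_cases d e with hs | ⟨_, hs⟩
    · rw [hs]; exact h
    · rw [hs]; exact PySem.Dict.nodup_keys_insert _ _ _ h

lemma pvWinKeysFrom (l : List (Int × List (String × String))) :
    ∀ (d : PySem.Dict String ((Int × Int) × String)) (p : String),
    p ∈ (l.foldl pvWinStep d).keys →
    p ∈ d.keys ∨ (p ≠ "" ∧ ∃ e ∈ l, pvPhaseId e.2 = p) := by
  induction l with
  | nil => intro d p h; exact Or.inl h
  | cons e t ih =>
    intro d p h
    rw [List.foldl_cons] at h
    rcases ih _ p h with h' | ⟨hne, e', he', hp'⟩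
    · rcases pvWinStep_cases d e with hs | ⟨h0, hs⟩
      · rw [hs] at h'; exact Or.inl h'
      · rw [hs] at h'
        rcases (PySem.Dict.mem_keys_insert _ _ _ _).mp h' with rfl | hm
        · exact Or.inr ⟨h0, e, List.mem_cons_self, rfl⟩
        · exact Or.inl hm
    · exact Or.inr ⟨hne, e', List.mem_cons_of_mem _ he', hp'⟩

lemma pvBest_some_of_some (l : List (Int × List (String × String)))
    (v0 : (Int × Int) × String) :
    ∃ v, l.foldl (fun o e => some (pvCombine o (pvVal e))) (some v0) = some v := by
  induction l generalizing v0 with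
  | nil => exact ⟨v0, rfl⟩
  | cons e t ih => exact ih _

lemma pvCombine_le_right (o : Option ((Int × Int) × String)) (n : (Int × Int) × String) :
    toLex (pvCombine o n).1 ≤ toLex n.1 := by
  cases o with
  | none => exact le_refl _
  | some v =>
    by_cases h : toLex n.1 < toLex v.1
    · simp [pvCombine, h]
    · simp only [pvCombine, h, if_false]
      exact le_of_not_gt h

lemma pvCombine_le_left {u : (Int × Int) × String} (o : Option ((Int × Int) × String))
    (n : (Int × Int) × String) (h : o = some u) : toLex (pvCombine o n).1 ≤ toLex u.1 := by
  subst h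
  by_cases h : toLex n.1 < toLex u.1
  · simp only [pvCombine, h, if_true]
    exact le_of_lt h
  · simp [pvCombine, h]

lemma pvCombine_mem (o : Option ((Int × Int) × String)) (n : (Int × Int) × String) :
    pvCombine o n = n ∨ ∃ u, o = some u ∧ pvCombine o n = u := by
  cases o with
  | none => exact Or.inl rfl
  | some v =>
    by_cases h : toLex n.1 < toLex v.1
    · left; simp [pvCombine, h]
    · right; exact ⟨v, rfl, by simp [pvCombine, h]⟩

lemma pvBest_spec (l : List (Int × List (String × String))) :
    ∀ (o : Option ((Int × Int) × String)) (v : (Int × Int) × String),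
    l.foldl (fun o e => some (pvCombine o (pvVal e))) o = some v →
    (o = some v ∨ ∃ e ∈ l, v = pvVal e) ∧
    (∀ w, o = some w → toLex v.1 ≤ toLex w.1) ∧
    (∀ e ∈ l, toLex v.1 ≤ toLex (pvVal e).1) := by
  induction l with
  | nil =>
    intro o v h
    have ho : o = some v := h
    refine ⟨Or.inl ho, fun w hw => ?_, by simp⟩
    rw [ho] at hw
    obtain rfl := Option.some.inj hw
    exact le_refl _
  | cons e t ih =>
    intro o v h
    rw [List.foldl_cons] at h
    obtain ⟨h1, h2, h3⟩ := ih _ v h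
    have hcv : toLex v.1 ≤ toLex (pvCombine o (pvVal e)).1 := h2 _ rfl
    refine ⟨?_, ?_, ?_⟩
    · rcases h1 with h1 | ⟨e', he', hv⟩
      · have hv : pvCombine o (pvVal e) = v := Option.some.inj h1
        rcases pvCombine_mem o (pvVal e) with hm | ⟨u, hu, hm⟩
        · exact Or.inr ⟨e, List.mem_cons_self, by rw [← hv, hm]⟩
        · left; rw [hu, ← hm, hv]
      · exact Or.inr ⟨e', List.mem_cons_of_mem _ he', hv⟩
    · intro w hw
      exact le_trans hcv (pvCombine_le_left o (pvVal e) hw)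
    · intro e' he'
      rcases List.mem_cons.mp he' with rfl | h'
      · exact le_trans hcv (pvCombine_le_right o (pvVal e'))
      · exact h3 e' h'

lemma pvW'_get (traces : List (List (String × String))) (p : String)
    (v : (Int × Int) × String) (hp : (p, v) ∈ pvW' traces) :
    ((PySem.List.enumerate traces 0).foldl pvWinStep PySem.Dict.empty).get? p = some v := by
  unfold pvW' at hp
  obtain ⟨e, heF, hpe⟩ := List.mem_map.mp hp
  injection hpe with hpid hval
  obtain ⟨heD, hne, _⟩ := pvFirstD_sub heF
  have hpne : p ≠ "" := hpid ▸ hne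
  rw [pvWinGet _ PySem.Dict.empty p hpne, PySem.Dict.get?_empty]
  set S := (PySem.List.enumerate traces 0).filter (fun e => pvPhaseId e.2 == p) with hS
  have heS : e ∈ S := by
    rw [hS, List.mem_filter]
    exact ⟨(pvD_perm traces).mem_iff.mp heD, by simp [hpid]⟩
  obtain ⟨v0, hv0⟩ : ∃ v0, S.foldl (fun o e => some (pvCombine o (pvVal e))) none = some v0 := by
    cases hSc : S with
    | nil => rw [hSc] at heS; cases heS
    | cons a t =>
      rw [List.foldl_cons]
      exact pvBest_some_of_some t _
  obtain ⟨h1, _, h3⟩ := pvBest_spec S none v0 hv0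
  rcases h1 with h1 | ⟨e'', he'', hv''⟩
  · simp at h1
  · -- v0 = pvVal e''; show e'' = e
    have he''E : e'' ∈ PySem.List.enumerate traces 0 := (List.mem_filter.mp he'').1
    have hpid'' : pvPhaseId e''.2 = p := by
      have := (List.mem_filter.mp he'').2; simpa using this
    have hmin1 : pvKeyL e ≤ pvKeyL e'' := by
      refine pvFirstD_min (pvD_pairwise traces) heF e'' ?_ ?_
      · exact (pvD_perm traces).mem_iff.mpr he''E
      · rw [hpid'', hpid]
    have hmin2 : pvKeyL e'' ≤ pvKeyL e := by
      have := h3 e heS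
      rw [hv''] at this
      exact this
    have hkey : pvKeyL e'' = pvKeyL e := le_antisymm hmin2 hmin1
    have hfst : e''.1 = e.1 := by
      unfold pvKeyL at hkey
      have hpair : (pvSeqKey e''.2, e''.1) = (pvSeqKey e.2, e.1) := toLex_inj.mp hkey
      exact congrArg Prod.snd hpair
    have hee : e'' = e := pvE_inj he''E ((pvD_perm traces).mem_iff.mp heD) hfst
    rw [hv0, hv'', hee, hval]

lemma pvW'_complete (traces : List (List (String × String))) (p : String)
    (h : p ∈ ((PySem.List.enumerate traces 0).foldl pvWinStep PySem.Dict.empty).keys) :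
    ∃ v, (p, v) ∈ pvW' traces := by
  rcases pvWinKeysFrom _ PySem.Dict.empty p h with h' | ⟨hne, e, he, hpe⟩
  · rw [PySem.Dict.keys_empty] at h'; cases h'
  · have : ∃ e' ∈ pvD traces, pvPhaseId e'.2 = p :=
      ⟨e, (pvD_perm traces).mem_iff.mpr he, hpe⟩
    obtain ⟨e', he', hp'⟩ := pvFirstD_exists (l := pvD traces) (seen := PySem.Set.empty)
      hne (by simp [PySem.Set.empty, PySem.Set.contains]) this
    exact ⟨pvVal e', List.mem_map.mpr ⟨e', he', by rw [hp']⟩⟩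

lemma pvW'_nodup (traces : List (List (String × String))) : (pvW' traces).Nodup := by
  have h := pvFirstD_pid_nodup (pvD traces) PySem.Set.empty
  unfold pvW'
  refine List.Pairwise.map _ ?_ h
  intro a b hab
  simp only [ne_eq, Prod.mk.injEq, not_and]
  intro hpp _; exact hab hpp

lemma pvPermItems (traces : List (List (String × String))) :
    ((PySem.List.enumerate traces 0).foldl pvWinStep PySem.Dict.empty).items.Perm
      (pvW' traces) := by
  set d := (PySem.List.enumerate traces 0).foldl pvWinStep PySem.Dict.empty with hd
  have hnd : d.keys.Nodup := pvWinKeysNodup _ _ (PySem.Dict.nodup_keys_empty)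
  have hitems : d.items.Nodup := by
    have hkeq : d.items.map Prod.fst = d.keys := rfl
    have h2 : (d.items.map Prod.fst).Nodup := by rw [hkeq]; exact hnd
    exact h2.of_map
  refine (List.perm_ext_iff_of_nodup hitems (pvW'_nodup traces)).mpr ?_
  rintro ⟨p, v⟩
  constructor
  · intro hm
    have hget : d.get? p = some v := (PySem.Dict.get?_eq_some_iff_mem_items _ _ _ hnd).mpr hm
    have hk : p ∈ d.keys :=
      (show p ∈ d.items.map Prod.fst from List.mem_map.mpr ⟨(p, v), hm, rfl⟩)
    obtain ⟨v', hv'⟩ := pvW'_complete traces p hk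
    have hg := pvW'_get traces p v' hv'
    rw [← hd] at hg
    rw [hg] at hget
    have hvv := Option.some.inj hget
    rw [← hvv]
    exact hv'
  · intro hm
    have := pvW'_get traces p v hm
    rw [← hd] at this
    exact PySem.Dict.mem_items_of_get?_eq_some _ this

lemma pvW'_pairwise (traces : List (List (String × String))) :
    (pvW' traces).Pairwise (fun a b => toLex a.2.1 < toLex b.2.1) := by
  have h := (pvD_pairwise traces).sublist (pvFirstD_sublist (pvD traces) PySem.Set.empty)
  unfold pvW'
  exact List.Pairwise.map _ (fun a b hab => hab) h

lemma pvSortedItems (traces : List (List (String × String))) :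
    PySem.List.sorted ((PySem.List.enumerate traces 0).foldl pvWinStep PySem.Dict.empty).items
      (fun kv => toLex kv.2.1) false = pvW' traces :=
  PySem.List.sorted_eq_of_perm_of_pairwise_lt _ _ _ (pvPermItems traces).symm
    (pvW'_pairwise traces)

-- ===== VERDICT (by name: the statement is the Claim_ definition above) =====
theorem bundle_phase_timeline_py_spec : Claim_equal_bundle_phase_timeline_py := by
  intro traces _ _
  unfold Spec_bundle_phase_timeline_py
  simp only [bundle_phase_timeline_py, bundle_phase_timeline_py_alt]
  have hA : ((PySem.List.sorted traces pvSeqKey false).foldl pvScanStep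
      ([], PySem.Set.empty)).1
      = (pvFirstD (pvD traces) PySem.Set.empty).map
          (fun e => [("id", pvPhaseId e.2), ("status", pvStatus e.2)]) := by
    rw [pvSorted_eq]
    simpa using pvScanD (pvD traces) PySem.Set.empty []
  have hMaps : (pvW' traces).map (fun kv => [("id", kv.1), ("status", kv.2.2)])
      = (pvFirstD (pvD traces) PySem.Set.empty).map
          (fun e => [("id", pvPhaseId e.2), ("status", pvStatus e.2)]) := by
    unfold pvW'
    rw [List.map_map]
    rfl
  have hl2 : (pvW' traces).length = (pvFirstD (pvD traces) PySem.Set.empty).length := by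
    simp [pvW']
  have hlen : (((PySem.List.enumerate traces 0).foldl pvWinStep PySem.Dict.empty).items = [])
      ↔ (pvFirstD (pvD traces) PySem.Set.empty = []) := by
    rw [← List.length_eq_zero_iff, ← List.length_eq_zero_iff,
      (pvPermItems traces).length_eq, hl2]
  rw [hA, pvSortedItems, hMaps]
  by_cases hE : pvFirstD (pvD traces) PySem.Set.empty = []
  · have hM : (pvFirstD (pvD traces) PySem.Set.empty).map
        (fun e => [("id", pvPhaseId e.2), ("status", pvStatus e.2)]) = [] := by
      rw [hE]; rfl
    rw [if_pos hM, if_pos (hlen.mpr hE)]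
  · have h1 : (pvFirstD (pvD traces) PySem.Set.empty).map
        (fun e => [("id", pvPhaseId e.2), ("status", pvStatus e.2)]) ≠ [] := by
      simpa using hE
    have h2 : ((PySem.List.enumerate traces 0).foldl pvWinStep PySem.Dict.empty).items ≠ [] :=
      fun h => hE (hlen.mp h)
    rw [if_neg h1, if_neg h2]
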